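-- pv_equiv track=rewrite | github.com/kaiyao28/IDGeneratorPy | idgenerator.py | field_start
-- ===== SOURCE A (Python) =====
-- def field_start(blocks: str, field: str, center_len: int, track_len: int,
--                 digits: int, group_len: int = 0, study_len: int = 0,
--                 site_len: int = 0) -> int:
--     """Return the 0-based character position where `field` starts inside a built ID."""
--     pos = 0
--     for bb in blocks:
--         if bb == field:
--             return pos
--         if   bb == "C": pos += center_len
--         elif bb == "R": pos += site_len
--         elif bb == "T": pos += track_len
--         elif bb == "G": pos += group_len
--         elif bb == "S": pos += study_len
--         elif bb == "N": pos += digits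
--         elif bb in ("V", "X"): pos += 1
--     return -1
-- ===== SOURCE B (Python) =====
-- def field_start(blocks: str, field: str, center_len: int, track_len: int,
--                 digits: int, group_len: int = 0, study_len: int = 0,
--                 site_len: int = 0) -> int:
--     """Return the 0-based character position where `field` starts inside a built ID."""
--     idx = -1
--     for i, ch in enumerate(blocks):
--         if ch == field:
--             idx = i
--             break
--     if idx == -1:
--         return -1
--     widths = {"C": center_len, "R": site_len, "T": track_len, "G": group_len,
--               "S": study_len, "N": digits, "V": 1, "X": 1}
--     return sum(widths.get(ch, 0) for ch in blocks[:idx])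
-- ===== Notes on version B (the rewrite author's own statement) =====
-- stated objective: alternative
-- what changed: Replaces A's single early-returning accumulator loop by two separate passes: first locate the index of the matching block by per-character comparison, then sum the widths of the preceding blocks via a letter-to-width dict with default 0.
import Mathlib
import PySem

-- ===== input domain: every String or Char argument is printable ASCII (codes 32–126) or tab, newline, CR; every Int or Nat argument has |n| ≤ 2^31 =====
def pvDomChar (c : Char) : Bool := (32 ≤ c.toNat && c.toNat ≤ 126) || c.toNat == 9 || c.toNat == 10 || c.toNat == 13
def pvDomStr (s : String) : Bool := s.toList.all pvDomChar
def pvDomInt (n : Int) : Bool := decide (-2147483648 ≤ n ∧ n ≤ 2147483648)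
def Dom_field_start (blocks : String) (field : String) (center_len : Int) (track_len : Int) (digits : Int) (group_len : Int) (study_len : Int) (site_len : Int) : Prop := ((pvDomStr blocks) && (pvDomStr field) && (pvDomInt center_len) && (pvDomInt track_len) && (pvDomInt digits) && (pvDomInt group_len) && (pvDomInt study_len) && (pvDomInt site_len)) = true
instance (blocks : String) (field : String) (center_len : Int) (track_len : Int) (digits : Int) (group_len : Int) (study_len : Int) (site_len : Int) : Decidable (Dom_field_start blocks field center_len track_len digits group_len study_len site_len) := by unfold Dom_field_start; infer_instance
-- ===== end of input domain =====

-- B replaces A's single early-returning accumulator loop with two passes (find the matching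
-- block's index, then sum the widths of the preceding blocks via a width map); alternative
-- decomposition, same cost.

-- ===== PORT A =====
-- A's loop: walk the blocks, return the running position on a match, else add the block's width.
def fsA_loop (field : String) (center_len : Int) (track_len : Int) (digits : Int)
    (group_len : Int) (study_len : Int) (site_len : Int) : List Char → Int → Int
  | [], _ => -1
  | bb :: rest, pos =>
    if String.mk [bb] = field then pos
    else
      fsA_loop field center_len track_len digits group_len study_len site_len rest
        (if bb = 'C' then pos + center_len
         else if bb = 'R' then pos + site_len
         else if bb = 'T' then pos + track_len
         else if bb = 'G' then pos + group_len
         else if bb = 'S' then pos + study_len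
         else if bb = 'N' then pos + digits
         else if bb = 'V' ∨ bb = 'X' then pos + 1
         else pos)

def field_start (blocks : String) (field : String) (center_len : Int) (track_len : Int) (digits : Int) (group_len : Int) (study_len : Int) (site_len : Int) : Int :=
  fsA_loop field center_len track_len digits group_len study_len site_len blocks.toList 0

-- ===== PORT B =====
-- B's first pass: index of the first block character equal to `field` (none if absent).
def fsB_find (field : String) : List Char → Nat → Option Nat
  | [], _ => none
  | ch :: rest, i => if String.mk [ch] = field then some i else fsB_find field rest (i + 1)

-- B's width map (Python dict literal).
def fsB_widths (center_len : Int) (track_len : Int) (digits : Int)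
    (group_len : Int) (study_len : Int) (site_len : Int) : PySem.Dict Char Int :=
  PySem.Dict.ofList [('C', center_len), ('R', site_len), ('T', track_len), ('G', group_len),
                     ('S', study_len), ('N', digits), ('V', 1), ('X', 1)]

def field_start_alt (blocks : String) (field : String) (center_len : Int) (track_len : Int) (digits : Int) (group_len : Int) (study_len : Int) (site_len : Int) : Int :=
  match fsB_find field blocks.toList 0 with
  | none => -1
  | some idx =>
    ((blocks.toList.take idx).map
      (fun ch => (fsB_widths center_len track_len digits group_len study_len site_len).getD ch 0)).sum

-- ===== PRECONDITION & SPEC =====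
def Spec_field_start (blocks : String) (field : String) (center_len : Int) (track_len : Int) (digits : Int) (group_len : Int) (study_len : Int) (site_len : Int) (out : Int) : Prop := out = field_start_alt blocks field center_len track_len digits group_len study_len site_len
instance (blocks : String) (field : String) (center_len : Int) (track_len : Int) (digits : Int) (group_len : Int) (study_len : Int) (site_len : Int) (out : Int) : Decidable (Spec_field_start blocks field center_len track_len digits group_len study_len site_len out) := by unfold Spec_field_start; infer_instance

-- ===== CLAIM (what is proved, stated in full; the proofs are below) =====
def Claim_equal_field_start : Prop := ∀ (blocks : String) (field : String) (center_len : Int) (track_len : Int) (digits : Int) (group_len : Int) (study_len : Int) (site_len : Int), Dom_field_start blocks field center_len track_len digits group_len study_len site_len → Spec_field_start blocks field center_len track_len digits group_len study_len site_len (field_start blocks field center_len track_len digits group_len study_len site_len)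

-- ===== LEMMAS AND PROOFS =====

-- The width map lookup agrees with A's if-chain of increments.
set_option maxHeartbeats 1000000 in
theorem widths_getD (center_len track_len digits group_len study_len site_len : Int) (ch : Char) :
    (fsB_widths center_len track_len digits group_len study_len site_len).getD ch 0 =
      (if ch = 'C' then center_len
       else if ch = 'R' then site_len
       else if ch = 'T' then track_len
       else if ch = 'G' then group_len
       else if ch = 'S' then study_len
       else if ch = 'N' then digits
       else if ch = 'V' ∨ ch = 'X' then 1
       else 0) := by
  have hmk : fsB_widths center_len track_len digits group_len study_len site_len =
      PySem.Dict.mk [('C', center_len), ('R', site_len), ('T', track_len), ('G', group_len),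
                     ('S', study_len), ('N', digits), ('V', 1), ('X', 1)] := by
    rfl
  rw [hmk]
  simp only [PySem.Dict.getD, PySem.Dict.get?_mk_cons]
  split_ifs with h1 h2 h3 h4 h5 h6 h7 <;>
    simp_all [PySem.Dict.get?, @eq_comm Char]

theorem fsB_find_ge (field : String) : ∀ (l : List Char) (i j : Nat),
    fsB_find field l i = some j → i ≤ j := by
  intro l
  induction l with
  | nil => intro i j h; simp [fsB_find] at h
  | cons ch rest ih =>
    intro i j h
    by_cases hc : String.mk [ch] = field
    · simp [fsB_find, hc] at h; omega
    · simp [fsB_find, hc] at h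
      have := ih (i + 1) j h
      omega

theorem loop_eq (field : String) (c t d g s r : Int) :
    ∀ (l : List Char) (i : Nat) (pos : Int),
      fsA_loop field c t d g s r l pos =
        (match fsB_find field l i with
         | none => -1
         | some j => pos + ((l.take (j - i)).map (fun ch => (fsB_widths c t d g s r).getD ch 0)).sum) := by
  intro l
  induction l with
  | nil => intro i pos; simp [fsA_loop, fsB_find]
  | cons bb rest ih =>
    intro i pos
    by_cases hc : String.mk [bb] = field
    · simp [fsA_loop, fsB_find, hc]
    · have hrec := ih (i + 1)
      cases hfind : fsB_find field rest (i + 1) with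
      | none =>
        simp [fsA_loop, fsB_find, hc, hfind]
        have := hrec (if bb = 'C' then pos + c
         else if bb = 'R' then pos + r
         else if bb = 'T' then pos + t
         else if bb = 'G' then pos + g
         else if bb = 'S' then pos + s
         else if bb = 'N' then pos + d
         else if bb = 'V' ∨ bb = 'X' then pos + 1
         else pos)
        rw [hfind] at this
        exact this
      | some j =>
        have hij : i + 1 ≤ j := fsB_find_ge field rest (i + 1) j hfind
        have htake : (bb :: rest).take (j - i) = bb :: rest.take (j - (i + 1)) := by
          have hj : j - i = (j - (i + 1)) + 1 := by omega
          rw [hj]; rfl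
        simp only [fsA_loop, fsB_find, hc, if_false, hfind, htake]
        have hstep := hrec (if bb = 'C' then pos + c
         else if bb = 'R' then pos + r
         else if bb = 'T' then pos + t
         else if bb = 'G' then pos + g
         else if bb = 'S' then pos + s
         else if bb = 'N' then pos + d
         else if bb = 'V' ∨ bb = 'X' then pos + 1
         else pos)
        rw [hfind] at hstep
        rw [hstep]
        rw [List.map_cons, List.sum_cons, widths_getD]
        split_ifs <;> ring

-- ===== VERDICT (by name: the statement is the Claim_ definition above) =====
theorem field_start_spec : Claim_equal_field_start := by
  intro blocks field c t d g s r _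
  unfold Spec_field_start field_start field_start_alt
  rw [loop_eq field c t d g s r blocks.toList 0 0]
  cases hfind : fsB_find field blocks.toList 0 with
  | none => rfl
  | some j => simp
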